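-- pv_equiv track=rewrite | github.com/iskandarsulaili/openkore-ai | openkore-ai/ai-service/data-validation/validators/item_validator.py | _calculate_weight_distribution
-- ===== SOURCE A (Python) =====
-- from typing import Dict, List, Any, Optional
--
-- def _calculate_weight_distribution(items: List[Dict[str, Any]]) -> Dict[str, int]:
--     """Calculate distribution of items by weight ranges."""
--     distribution = {
--         '0-100': 0,
--         '101-500': 0,
--         '501-1000': 0,
--         '1001-5000': 0,
--         '5000+': 0
--     }
--
--     for item in items:
--         weight = item.get('weight', 0)
--         if weight <= 100:
--             distribution['0-100'] += 1
--         elif weight <= 500: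
--             distribution['101-500'] += 1
--         elif weight <= 1000:
--             distribution['501-1000'] += 1
--         elif weight <= 5000:
--             distribution['1001-5000'] += 1
--         else:
--             distribution['5000+'] += 1
--
--     return distribution
-- ===== SOURCE B (Python) =====
-- from typing import Dict, List, Any, Optional
--
-- _BOUNDS = [100, 500, 1000, 5000]
-- _LABELS = ['0-100', '101-500', '501-1000', '1001-5000', '5000+']
--
-- def _calculate_weight_distribution(items: List[Dict[str, Any]]) -> Dict[str, int]:
--     """Calculate distribution of items by weight ranges (boundary-table binary search)."""
--     counts = [0] * 5
--     for item in items: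
--         weight = item.get('weight', 0)
--         # bisect_left(_BOUNDS, weight): first index whose bound is >= weight
--         lo, hi = 0, 4
--         while lo < hi:
--             mid = (lo + hi) // 2
--             if _BOUNDS[mid] < weight:
--                 lo = mid + 1
--             else:
--                 hi = mid
--         counts[lo] += 1
--     return dict(zip(_LABELS, counts))
-- ===== Notes on version B (the rewrite author's own statement) =====
-- stated objective: alternative
-- what changed: Replaces the linear elif threshold chain updating a dict by name with a bisect_left binary search over a boundary table that indexes into a parallel counts array, zipped with labels at the end.
import Mathlib
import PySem

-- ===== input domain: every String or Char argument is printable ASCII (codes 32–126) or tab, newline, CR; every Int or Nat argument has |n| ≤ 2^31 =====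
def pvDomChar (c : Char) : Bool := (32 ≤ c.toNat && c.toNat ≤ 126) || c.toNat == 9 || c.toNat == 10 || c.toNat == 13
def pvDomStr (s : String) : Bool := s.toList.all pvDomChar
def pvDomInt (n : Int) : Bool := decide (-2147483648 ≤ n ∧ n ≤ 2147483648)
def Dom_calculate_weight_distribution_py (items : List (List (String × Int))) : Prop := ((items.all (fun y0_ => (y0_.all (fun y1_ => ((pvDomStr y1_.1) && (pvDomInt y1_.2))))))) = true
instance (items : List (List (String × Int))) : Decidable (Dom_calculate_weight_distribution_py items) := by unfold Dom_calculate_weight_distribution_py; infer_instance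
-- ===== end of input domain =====

-- B replaces A's linear elif threshold chain by a hand-rolled bisect_left over a boundary
-- table with a parallel label table (objective: alternative/simpler bucketing).

-- ===== PORT A =====
def calculate_weight_distribution_py (items : List (List (String × Int))) : List (String × Int) :=
  let distribution : PySem.Dict String Int :=
    PySem.Dict.mk [("0-100", 0), ("101-500", 0), ("501-1000", 0), ("1001-5000", 0), ("5000+", 0)]
  (items.foldl (fun d item =>
      let weight := (PySem.Dict.mk item).getD "weight" 0
      if weight ≤ 100 then d.modify "0-100" 0 (· + 1)
      else if weight ≤ 500 then d.modify "101-500" 0 (· + 1)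
      else if weight ≤ 1000 then d.modify "501-1000" 0 (· + 1)
      else if weight ≤ 5000 then d.modify "1001-5000" 0 (· + 1)
      else d.modify "5000+" 0 (· + 1)) distribution).items

-- ===== PORT B =====
def pvBounds : List Int := [100, 500, 1000, 5000]
def pvLabels : List String := ["0-100", "101-500", "501-1000", "1001-5000", "5000+"]

-- the 'while lo < hi' bisect_left loop of Source B, step for step
def pvBisect (weight : Int) (lo hi : Nat) : Nat :=
  if lo < hi then
    let mid := (lo + hi) / 2
    if PySem.List.pyGetD pvBounds (mid : Int) 0 < weight then pvBisect weight (mid + 1) hi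
    else pvBisect weight lo mid
  else lo
termination_by hi - lo
decreasing_by all_goals omega

def calculate_weight_distribution_py_alt (items : List (List (String × Int))) : List (String × Int) :=
  let counts : List Int := [0, 0, 0, 0, 0]
  let counts := items.foldl (fun c item =>
      let weight := (PySem.Dict.mk item).getD "weight" 0
      let lo := pvBisect weight 0 4
      PySem.List.pySetD c (lo : Int) (PySem.List.pyGetD c (lo : Int) 0 + 1)) counts
  (PySem.Dict.ofList (pvLabels.zip counts)).items

-- ===== PRECONDITION & SPEC =====
def Spec_calculate_weight_distribution_py (items : List (List (String × Int))) (out : List (String × Int)) : Prop := out = calculate_weight_distribution_py_alt items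
instance (items : List (List (String × Int))) (out : List (String × Int)) : Decidable (Spec_calculate_weight_distribution_py items out) := by unfold Spec_calculate_weight_distribution_py; infer_instance

-- ===== CLAIM (what is proved, stated in full; the proofs are below) =====
def Claim_equal_calculate_weight_distribution_py : Prop := ∀ (items : List (List (String × Int))), Dom_calculate_weight_distribution_py items → Spec_calculate_weight_distribution_py items (calculate_weight_distribution_py items)

-- ===== LEMMAS AND PROOFS =====

theorem pvBisect_unfold (w : Int) (lo hi : Nat) : pvBisect w lo hi =
    if lo < hi then
      if PySem.List.pyGetD pvBounds (((lo + hi) / 2 : Nat) : Int) 0 < w then pvBisect w ((lo + hi) / 2 + 1) hi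
      else pvBisect w lo ((lo + hi) / 2)
    else lo := by
  rw [pvBisect]

theorem pvBisect_spec (w : Int) :
    pvBisect w 0 4 = if w ≤ 100 then 0 else if w ≤ 500 then 1
      else if w ≤ 1000 then 2 else if w ≤ 5000 then 3 else 4 := by
  rw [pvBisect_unfold w 0 4, pvBisect_unfold w 3 4, pvBisect_unfold w 0 2,
      pvBisect_unfold w 4 4, pvBisect_unfold w 3 3, pvBisect_unfold w 2 2,
      pvBisect_unfold w 0 1, pvBisect_unfold w 1 1, pvBisect_unfold w 0 0]
  norm_num [pvBounds, PySem.List.pyGetD, PySem.List.pyIdx?]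
  split_ifs <;> simp_all <;> omega

theorem pv_step (item : List (String × Int)) (n0 n1 n2 n3 n4 : Int) :
    ∃ m0 m1 m2 m3 m4 : Int,
      ((fun (d : PySem.Dict String Int) item =>
        let weight := (PySem.Dict.mk item).getD "weight" 0
        if weight ≤ 100 then d.modify "0-100" 0 (· + 1)
        else if weight ≤ 500 then d.modify "101-500" 0 (· + 1)
        else if weight ≤ 1000 then d.modify "501-1000" 0 (· + 1)
        else if weight ≤ 5000 then d.modify "1001-5000" 0 (· + 1)
        else d.modify "5000+" 0 (· + 1))
        (PySem.Dict.mk [("0-100", n0), ("101-500", n1), ("501-1000", n2), ("1001-5000", n3), ("5000+", n4)]) item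
        = PySem.Dict.mk [("0-100", m0), ("101-500", m1), ("501-1000", m2), ("1001-5000", m3), ("5000+", m4)])
      ∧ ((fun (c : List Int) item =>
        let weight := (PySem.Dict.mk item).getD "weight" 0
        let lo := pvBisect weight 0 4
        PySem.List.pySetD c (lo : Int) (PySem.List.pyGetD c (lo : Int) 0 + 1)) [n0, n1, n2, n3, n4] item
        = [m0, m1, m2, m3, m4]) := by
  by_cases h1 : (PySem.Dict.mk item).getD "weight" 0 ≤ 100
  · exact ⟨n0 + 1, n1, n2, n3, n4,
      by show ite _ _ _ = _; rw [if_pos h1]; simp [PySem.Dict.modify, PySem.Dict.getD, PySem.Dict.get?, PySem.Dict.insert, PySem.Dict.contains],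
      by show PySem.List.pySetD _ _ _ = _; rw [pvBisect_spec, if_pos h1]; simp [PySem.List.pySetD, PySem.List.pySet?, PySem.List.pyGetD, PySem.List.pyIdx?]⟩
  · by_cases h2 : (PySem.Dict.mk item).getD "weight" 0 ≤ 500
    · exact ⟨n0, n1 + 1, n2, n3, n4,
        by show ite _ _ _ = _; rw [if_neg h1, if_pos h2]; simp [PySem.Dict.modify, PySem.Dict.getD, PySem.Dict.get?, PySem.Dict.insert, PySem.Dict.contains],
        by show PySem.List.pySetD _ _ _ = _; rw [pvBisect_spec, if_neg h1, if_pos h2]; simp [PySem.List.pySetD, PySem.List.pySet?, PySem.List.pyGetD, PySem.List.pyIdx?]⟩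
    · by_cases h3 : (PySem.Dict.mk item).getD "weight" 0 ≤ 1000
      · exact ⟨n0, n1, n2 + 1, n3, n4,
          by show ite _ _ _ = _; rw [if_neg h1, if_neg h2, if_pos h3]; simp [PySem.Dict.modify, PySem.Dict.getD, PySem.Dict.get?, PySem.Dict.insert, PySem.Dict.contains],
          by show PySem.List.pySetD _ _ _ = _; rw [pvBisect_spec, if_neg h1, if_neg h2, if_pos h3]; simp [PySem.List.pySetD, PySem.List.pySet?, PySem.List.pyGetD, PySem.List.pyIdx?]⟩
      · by_cases h4 : (PySem.Dict.mk item).getD "weight" 0 ≤ 5000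
        · exact ⟨n0, n1, n2, n3 + 1, n4,
            by show ite _ _ _ = _; rw [if_neg h1, if_neg h2, if_neg h3, if_pos h4]; simp [PySem.Dict.modify, PySem.Dict.getD, PySem.Dict.get?, PySem.Dict.insert, PySem.Dict.contains],
            by show PySem.List.pySetD _ _ _ = _; rw [pvBisect_spec, if_neg h1, if_neg h2, if_neg h3, if_pos h4]; simp [PySem.List.pySetD, PySem.List.pySet?, PySem.List.pyGetD, PySem.List.pyIdx?]⟩
        · exact ⟨n0, n1, n2, n3, n4 + 1,
            by show ite _ _ _ = _; rw [if_neg h1, if_neg h2, if_neg h3, if_neg h4]; simp [PySem.Dict.modify, PySem.Dict.getD, PySem.Dict.get?, PySem.Dict.insert, PySem.Dict.contains],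
            by show PySem.List.pySetD _ _ _ = _; rw [pvBisect_spec, if_neg h1, if_neg h2, if_neg h3, if_neg h4]; simp [PySem.List.pySetD, PySem.List.pySet?, PySem.List.pyGetD, PySem.List.pyIdx?]⟩

theorem pv_main (items : List (List (String × Int))) (n0 n1 n2 n3 n4 : Int) :
    (items.foldl (fun d item =>
      let weight := (PySem.Dict.mk item).getD "weight" 0
      if weight ≤ 100 then d.modify "0-100" 0 (· + 1)
      else if weight ≤ 500 then d.modify "101-500" 0 (· + 1)
      else if weight ≤ 1000 then d.modify "501-1000" 0 (· + 1)
      else if weight ≤ 5000 then d.modify "1001-5000" 0 (· + 1)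
      else d.modify "5000+" 0 (· + 1))
      (PySem.Dict.mk [("0-100", n0), ("101-500", n1), ("501-1000", n2), ("1001-5000", n3), ("5000+", n4)])).items
    = (PySem.Dict.ofList (pvLabels.zip (items.foldl (fun c item =>
        let weight := (PySem.Dict.mk item).getD "weight" 0
        let lo := pvBisect weight 0 4
        PySem.List.pySetD c (lo : Int) (PySem.List.pyGetD c (lo : Int) 0 + 1)) [n0, n1, n2, n3, n4]))).items := by
  induction items generalizing n0 n1 n2 n3 n4 with
  | nil =>
      simp [pvLabels, PySem.Dict.ofList, PySem.Dict.update, PySem.Dict.insert,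
            PySem.Dict.contains, PySem.Dict.empty]
  | cons item rest ih =>
      simp only [List.foldl_cons]
      obtain ⟨m0, m1, m2, m3, m4, hA, hB⟩ := pv_step item n0 n1 n2 n3 n4
      simp only [] at hA hB
      rw [hA, hB]
      exact ih m0 m1 m2 m3 m4

-- ===== VERDICT (by name: the statement is the Claim_ definition above) =====
theorem calculate_weight_distribution_py_spec : Claim_equal_calculate_weight_distribution_py := by
  intro items _
  unfold Spec_calculate_weight_distribution_py calculate_weight_distribution_py calculate_weight_distribution_py_alt
  exact pv_main items 0 0 0 0 0
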